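-- pv_equiv track=rewrite | github.com/clay-good/mantissa-log | src/shared/apm/apm_detector.py | _find_connected_error_services
-- ===== SOURCE A (Python) =====
-- from typing import Any, Dict, List, Optional, Tuple
--
-- def _find_connected_error_services(
--
--     error_services: List[str],
--     dependencies: Dict[str, List[str]],
-- ) -> set:
--     """Find services in error that are connected via dependencies."""
--     error_set = set(error_services)
--     connected = set()
--
--     # Build reverse dependency map
--     reverse_deps = {}
--     for source, targets in dependencies.items():
--         for target in targets:
--             if target not in reverse_deps:
--                 reverse_deps[target] = []
--             reverse_deps[target].append(source)
--
--     # BFS to find connected services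
--     for service in error_services:
--         # Check downstream
--         if service in dependencies:
--             for downstream in dependencies[service]:
--                 if downstream in error_set:
--                     connected.add(service)
--                     connected.add(downstream)
--
--         # Check upstream
--         if service in reverse_deps:
--             for upstream in reverse_deps[service]:
--                 if upstream in error_set:
--                     connected.add(service)
--                     connected.add(upstream)
--
--     return connected
-- ===== SOURCE B (Python) =====
-- def _find_connected_error_services(error_services, dependencies):
--     """Find services in error that are connected via dependencies."""
--     error_set = set(error_services)
--     connected = set()
--     for service in error_services:
--         neighbors = [t for t in dependencies.get(service, []) if t in error_set]
--         neighbors += [src for src, targets in dependencies.items()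
--                       for t in targets if t == service and src in error_set]
--         if neighbors:
--             connected.add(service)
--             connected.update(neighbors)
--     return connected
-- ===== Notes on version B (the rewrite author's own statement) =====
-- stated objective: simpler
-- what changed: B drops A's reverse-dependency index and its two guarded add-loops entirely: for each error service it builds the list of error neighbours (downstream via one dict lookup, upstream via a direct comprehension over the edges) and does a single set update, so there is no auxiliary reverse map and no per-neighbour conditional adds.
import Mathlib
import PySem

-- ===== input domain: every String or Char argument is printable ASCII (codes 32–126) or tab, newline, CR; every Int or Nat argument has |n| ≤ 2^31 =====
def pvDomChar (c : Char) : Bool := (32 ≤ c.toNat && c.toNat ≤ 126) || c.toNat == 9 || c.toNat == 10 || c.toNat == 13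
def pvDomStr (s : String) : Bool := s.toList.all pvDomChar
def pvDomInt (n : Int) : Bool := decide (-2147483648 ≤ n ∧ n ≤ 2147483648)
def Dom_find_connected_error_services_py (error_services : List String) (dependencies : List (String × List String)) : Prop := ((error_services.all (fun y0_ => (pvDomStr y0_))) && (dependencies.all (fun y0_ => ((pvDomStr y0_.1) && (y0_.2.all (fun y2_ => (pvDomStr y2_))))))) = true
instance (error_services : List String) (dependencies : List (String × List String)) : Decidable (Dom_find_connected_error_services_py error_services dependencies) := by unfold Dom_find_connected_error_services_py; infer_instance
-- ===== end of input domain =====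

-- B drops A's reverse-dependency index and guarded add-loops: per error service it collects the
-- error neighbours by comprehension and does one set update (simpler; no speed claim).

-- ===== PORT A =====
def find_connected_error_services_py (error_services : List String) (dependencies : List (String × List String)) : List String :=
  let error_set : PySem.Set String := PySem.Set.ofList error_services
  let connected : PySem.Set String := PySem.Set.empty
  let deps : PySem.Dict String (List String) := PySem.Dict.mk dependencies
  -- Build reverse dependency map
  let reverse_deps : PySem.Dict String (List String) :=
    deps.items.foldl (fun rd st =>
      st.2.foldl (fun rd target =>
        let rd := if rd.contains target then rd else rd.insert target []
        rd.modify target [] (fun l => l ++ [st.1])) rd) PySem.Dict.empty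
  error_services.foldl (fun connected service =>
    -- Check downstream
    let connected :=
      if deps.contains service then
        (deps.getD service []).foldl (fun c downstream =>
          if PySem.Set.contains error_set downstream then
            PySem.Set.add (PySem.Set.add c service) downstream
          else c) connected
      else connected
    -- Check upstream
    if reverse_deps.contains service then
      (reverse_deps.getD service []).foldl (fun c upstream =>
        if PySem.Set.contains error_set upstream then
          PySem.Set.add (PySem.Set.add c service) upstream
        else c) connected
    else connected) connected

-- ===== PORT B =====
def find_connected_error_services_py_alt (error_services : List String) (dependencies : List (String × List String)) : List String :=
  let error_set : PySem.Set String := PySem.Set.ofList error_services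
  let deps : PySem.Dict String (List String) := PySem.Dict.mk dependencies
  error_services.foldl (fun connected service =>
    let neighbors :=
      ((deps.getD service []).filter (fun t => PySem.Set.contains error_set t))
      ++ deps.items.flatMap (fun st =>
           (st.2.filter (fun t => t == service && PySem.Set.contains error_set st.1)).map (fun _ => st.1))
    if neighbors.isEmpty then connected
    else PySem.Set.update (PySem.Set.add connected service) neighbors) PySem.Set.empty

-- ===== PRECONDITION & SPEC =====
def Spec_find_connected_error_services_py (error_services : List String) (dependencies : List (String × List String)) (out : List String) : Prop := out = find_connected_error_services_py_alt error_services dependencies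
instance (error_services : List String) (dependencies : List (String × List String)) (out : List String) : Decidable (Spec_find_connected_error_services_py error_services dependencies out) := by unfold Spec_find_connected_error_services_py; infer_instance

-- ===== CLAIM (what is proved, stated in full; the proofs are below) =====
def Claim_equal_find_connected_error_services_py : Prop := ∀ (error_services : List String) (dependencies : List (String × List String)), Dom_find_connected_error_services_py error_services dependencies → Spec_find_connected_error_services_py error_services dependencies (find_connected_error_services_py error_services dependencies)

-- ===== LEMMAS AND PROOFS =====

-- the inner step of A's reverse-map build
def pvRevStep (src : String) (rd : PySem.Dict String (List String)) (target : String) : PySem.Dict String (List String) :=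
  let rd := if rd.contains target then rd else rd.insert target []
  rd.modify target [] (fun l => l ++ [src])

lemma getD_pvRevStep (src target s : String) (rd : PySem.Dict String (List String)) :
    (pvRevStep src rd target).getD s [] =
      if s = target then rd.getD s [] ++ [src] else rd.getD s [] := by
  unfold pvRevStep
  by_cases hc : rd.contains target = true
  · rw [if_pos hc, PySem.Dict.getD_modify]
    by_cases h : s = target
    · subst h; rfl
    · rw [if_neg h, if_neg h]
  · rw [if_neg hc, PySem.Dict.getD_modify]
    simp only [Bool.not_eq_true] at hc
    by_cases h : s = target
    · subst h
      rw [if_pos rfl, if_pos rfl, PySem.Dict.getD_insert_self,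
          PySem.Dict.getD_of_not_contains rd [] hc]
    · rw [if_neg h, if_neg h, PySem.Dict.getD_insert_of_ne rd [] [] h]

lemma getD_rev_inner (src s : String) (ts : List String) (rd : PySem.Dict String (List String)) :
    (ts.foldl (pvRevStep src) rd).getD s [] =
      rd.getD s [] ++ (ts.filter (fun t => t == s)).map (fun _ => src) := by
  induction ts generalizing rd with
  | nil => simp
  | cons t ts ih =>
    simp only [List.foldl_cons, List.filter_cons, ih, getD_pvRevStep]
    by_cases h : s = t
    · subst h; simp
    · have : (t == s) = false := by simp [Ne.symm h]
      simp [this, h]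

lemma getD_rev_build (s : String) (dl : List (String × List String)) (rd : PySem.Dict String (List String)) :
    (dl.foldl (fun rd st => st.2.foldl (pvRevStep st.1) rd) rd).getD s [] =
      rd.getD s [] ++ dl.flatMap (fun st => (st.2.filter (fun t => t == s)).map (fun _ => st.1)) := by
  induction dl generalizing rd with
  | nil => simp
  | cons st dl ih => simp [ih, getD_rev_inner, List.append_assoc]

-- the conditional add-loop of A filters, then adds the pair (service, x) for each survivor
lemma foldl_addpair_filter (p : String → Bool) (s : String) (l : List String) (acc : PySem.Set String) :
    l.foldl (fun a x => if p x then PySem.Set.add (PySem.Set.add a s) x else a) acc =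
      (l.filter p).foldl (fun a x => PySem.Set.add (PySem.Set.add a s) x) acc := by
  induction l generalizing acc with
  | nil => rfl
  | cons x l ih =>
    by_cases h : p x = true
    · simp [h, ih]
    · simp only [Bool.not_eq_true] at h
      simp [h, ih]

lemma foldl_addpair_of_mem (s : String) (l : List String) (b : PySem.Set String) (h : s ∈ b) :
    l.foldl (fun a x => PySem.Set.add (PySem.Set.add a s) x) b = PySem.Set.update b l := by
  induction l generalizing b with
  | nil => rfl
  | cons x l ih =>
    simp only [List.foldl_cons, PySem.Set.add_of_mem h]
    rw [ih _ (by rw [PySem.Set.mem_add]; exact Or.inl h)]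
    rfl

lemma foldl_addpair_eq_update (s : String) (l : List String) (acc : PySem.Set String) :
    l.foldl (fun a x => PySem.Set.add (PySem.Set.add a s) x) acc =
      if l.isEmpty then acc else PySem.Set.update (PySem.Set.add acc s) l := by
  cases l with
  | nil => rfl
  | cons x l =>
    simp only [List.foldl_cons, List.isEmpty_cons, Bool.false_eq_true, if_false]
    have hs : s ∈ PySem.Set.add (PySem.Set.add acc s) x := by
      rw [PySem.Set.mem_add]; exact Or.inl (by rw [PySem.Set.mem_add]; exact Or.inr rfl)
    rw [foldl_addpair_of_mem s l _ hs]
    rfl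

-- a guarded dict loop is the unguarded one (absent key ⇒ empty list)
lemma guarded_fold_eq (d : PySem.Dict String (List String)) (k : String)
    (f : PySem.Set String → String → PySem.Set String) (acc : PySem.Set String) :
    (if d.contains k then (d.getD k []).foldl f acc else acc) = (d.getD k []).foldl f acc := by
  by_cases h : d.contains k
  · simp [h]
  · simp only [Bool.not_eq_true] at h
    rw [if_neg (by simp [h]), PySem.Dict.getD_of_not_contains d [] h]
    rfl

-- A's filtered upstream list is exactly B's comprehension
lemma filter_upstream (p : String → Bool) (s : String) (dl : List (String × List String)) :
    (dl.flatMap (fun st => (st.2.filter (fun t => t == s)).map (fun _ => st.1))).filter p =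
      dl.flatMap (fun st => (st.2.filter (fun t => t == s && p st.1)).map (fun _ => st.1)) := by
  rw [List.filter_flatMap]
  refine List.flatMap_congr (fun st _ => ?_)
  by_cases hp : p st.1 = true
  · rw [List.filter_map]
    have h1 : ((fun t => t == s && p st.1)) = (fun t => t == s) := by funext t; simp [hp]
    have h2 : (p ∘ fun _ => st.1) = (fun _ : String => true) := by funext t; simp [hp]
    rw [h1, h2, List.filter_true]
  · simp only [Bool.not_eq_true] at hp
    have h1 : ((fun t => t == s && p st.1)) = (fun _ : String => false) := by funext t; simp [hp]
    rw [List.filter_map, h1, List.filter_false]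
    have h2 : (p ∘ fun _ : String => st.1) = (fun _ : String => false) := by funext t; simp [hp]
    rw [h2, List.filter_false, List.map_nil]

-- ===== VERDICT (by name: the statement is the Claim_ definition above) =====
theorem find_connected_error_services_py_spec : Claim_equal_find_connected_error_services_py := by
  intro error_services dependencies _
  show find_connected_error_services_py error_services dependencies = _
  unfold find_connected_error_services_py find_connected_error_services_py_alt
  simp only []
  congr 1
  funext connected service
  rw [guarded_fold_eq, guarded_fold_eq,
      show (fun rd (st : String × List String) => st.2.foldl (fun rd target =>
        (if rd.contains target then rd else rd.insert target []).modify target [] (fun l => l ++ [st.1])) rd)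
        = (fun rd st => st.2.foldl (pvRevStep st.1) rd) from rfl,
      getD_rev_build, PySem.Dict.getD_empty, List.nil_append,
      foldl_addpair_filter, foldl_addpair_filter, ← List.foldl_append,
      foldl_addpair_eq_update, filter_upstream]
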